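-- pv_equiv track=rewrite | github.com/OCHA-DAP/hdx-ckan | ckanext-hdx_users/ckanext/hdx_users/helpers/onboarding.py | _get_user_extra
-- ===== SOURCE A (Python) =====
-- HDX_ONBOARDING_CAME_FROM = 'hdx_onboarding_came_from'
--
-- HDX_ONBOARDING_CAME_FROM_STATE = 'hdx_onboarding_came_from_state'
--
-- def _get_user_extra(ue_user):
--     state = 'inactive'
--     came_from = None
--     for ue_item in ue_user:
--         if ue_item.get('key') == HDX_ONBOARDING_CAME_FROM_STATE:
--             state = ue_item.get('value')
--         if ue_item.get('key') == HDX_ONBOARDING_CAME_FROM: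
--             came_from = ue_item.get('value')
--     return came_from, state
-- ===== SOURCE B (Python) =====
-- HDX_ONBOARDING_CAME_FROM = 'hdx_onboarding_came_from'
--
-- HDX_ONBOARDING_CAME_FROM_STATE = 'hdx_onboarding_came_from_state'
--
-- def _get_user_extra(ue_user):
--     # Two staged backward scans with early exit: since A's forward loop keeps
--     # the LAST item for each key, scanning in reverse and returning at the
--     # FIRST match yields the same value without visiting the rest of the list.
--     def _last(key, default):
--         for it in reversed(ue_user):
--             if it.get('key') == key:
--                 return it.get('value')
--         return default
--     return (_last(HDX_ONBOARDING_CAME_FROM, None),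
--             _last(HDX_ONBOARDING_CAME_FROM_STATE, 'inactive'))
-- ===== Notes on version B (the rewrite author's own statement) =====
-- stated objective: alternative
-- what changed: Replaces the single forward loop with two mutable accumulators by two staged backward scans that early-return at the first match (last occurrence wins because the scan is reversed).
-- outside the precondition, e.g. on _get_user_extra([{'key': 'hdx_onboarding_came_from_state'}]): A returns (None, None), B returns (None, None)
import Mathlib
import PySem

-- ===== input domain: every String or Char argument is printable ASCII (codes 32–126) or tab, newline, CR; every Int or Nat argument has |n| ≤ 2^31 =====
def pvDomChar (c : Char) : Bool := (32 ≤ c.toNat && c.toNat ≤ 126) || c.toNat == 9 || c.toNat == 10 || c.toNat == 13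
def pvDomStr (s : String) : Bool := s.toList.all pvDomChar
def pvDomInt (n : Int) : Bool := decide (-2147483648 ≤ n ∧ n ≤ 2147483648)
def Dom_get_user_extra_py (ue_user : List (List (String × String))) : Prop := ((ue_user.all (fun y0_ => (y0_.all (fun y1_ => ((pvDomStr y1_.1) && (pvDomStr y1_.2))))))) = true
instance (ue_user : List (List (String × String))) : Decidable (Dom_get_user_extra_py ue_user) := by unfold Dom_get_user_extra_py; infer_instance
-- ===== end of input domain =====

-- B replaces A's one forward loop with two accumulators by two staged backward scans with early exit (alternative).

-- ===== PORT A =====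
-- 'd.get(k)' on an input dict, modelled as an association list with first-match lookup.
def pyAListGet? (it : List (String × String)) (k : String) : Option String :=
  (it.find? (fun p => p.1 == k)).map (·.2)

def hdxCameFrom : String := "hdx_onboarding_came_from"
def hdxCameFromState : String := "hdx_onboarding_came_from_state"

-- A's loop, step for step. The final '.getD ""' is reached only when Python's
-- 'state' is None (no 'value' key), which Pre_ excludes (result not a String there).
def get_user_extra_py (ue_user : List (List (String × String))) : Option String × String :=
  let r := ue_user.foldl
    (fun acc ue_item =>
      let acc := if pyAListGet? ue_item "key" == some hdxCameFromState
                 then (acc.1, pyAListGet? ue_item "value") else acc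
      if pyAListGet? ue_item "key" == some hdxCameFrom
      then (pyAListGet? ue_item "value", acc.2) else acc)
    ((none : Option String), (some "inactive" : Option String))
  (r.1, r.2.getD "")

-- ===== PORT B =====
-- B scans the reversed list and returns at the first match, per key.
-- The '.getD ""' arm is reached only when the matched item has no 'value' key, which Pre_ excludes.
def get_user_extra_py_alt (ue_user : List (List (String × String))) : Option String × String :=
  let rev := ue_user.reverse
  let cf := (rev.find? (fun it => pyAListGet? it "key" == some hdxCameFrom)).bind
              (fun it => pyAListGet? it "value")
  let st := match rev.find? (fun it => pyAListGet? it "key" == some hdxCameFromState) with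
            | none => "inactive"
            | some it => (pyAListGet? it "value").getD ""
  (cf, st)

-- ===== PRECONDITION & SPEC =====
-- Pre_ excludes inputs where an item carries the came-from-state key but no 'value' key:
-- there Python A returns None as the state, which is not a value of the declared String type.
def Pre_get_user_extra_py (ue_user : List (List (String × String))) : Prop :=
  ∀ it ∈ ue_user, pyAListGet? it "key" = some hdxCameFromState → (pyAListGet? it "value").isSome
instance (ue_user : List (List (String × String))) : Decidable (Pre_get_user_extra_py ue_user) := by
  unfold Pre_get_user_extra_py; infer_instance
def pvWitness_get_user_extra_py : (List (List (String × String))) :=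
  [[("key", "hdx_onboarding_came_from_state"), ("value", "active")],
   [("key", "hdx_onboarding_came_from"), ("value", "faq")]]

def Spec_get_user_extra_py (ue_user : List (List (String × String))) (out : Option String × String) : Prop := out = get_user_extra_py_alt ue_user
instance (ue_user : List (List (String × String))) (out : Option String × String) : Decidable (Spec_get_user_extra_py ue_user out) := by unfold Spec_get_user_extra_py; infer_instance

-- ===== CLAIM (what is proved, stated in full; the proofs are below) =====
def Claim_equal_get_user_extra_py : Prop := ∀ (ue_user : List (List (String × String))), Dom_get_user_extra_py ue_user → Pre_get_user_extra_py ue_user → Spec_get_user_extra_py ue_user (get_user_extra_py ue_user)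

-- ===== LEMMAS AND PROOFS =====

-- Invariant: A's left fold equals first-match lookups in the reversed list,
-- with the fold's start values as defaults.
theorem pv_inv (ue : List (List (String × String))) (cf0 st0 : Option String) :
    ue.foldl
      (fun acc ue_item =>
        let acc := if pyAListGet? ue_item "key" == some hdxCameFromState
                   then (acc.1, pyAListGet? ue_item "value") else acc
        if pyAListGet? ue_item "key" == some hdxCameFrom
        then (pyAListGet? ue_item "value", acc.2) else acc)
      (cf0, st0)
    = (((ue.reverse.find? (fun it => pyAListGet? it "key" == some hdxCameFrom)).map
          (fun it => pyAListGet? it "value")).getD cf0,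
       ((ue.reverse.find? (fun it => pyAListGet? it "key" == some hdxCameFromState)).map
          (fun it => pyAListGet? it "value")).getD st0) := by
  induction ue using List.reverseRecOn generalizing cf0 st0 with
  | nil => simp
  | append_singleton xs x ih =>
    simp only [List.foldl_append, List.foldl_cons, List.foldl_nil, ih,
      List.reverse_append, List.reverse_cons, List.reverse_nil, List.nil_append,
      List.singleton_append, List.find?_cons]
    have hne : hdxCameFrom ≠ hdxCameFromState := by decide
    have hb : (hdxCameFromState == hdxCameFrom) = false := by decide
    have hb' : (hdxCameFrom == hdxCameFromState) = false := by decide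
    by_cases h1 : pyAListGet? x "key" = some hdxCameFromState
    · have h2 : ¬ pyAListGet? x "key" = some hdxCameFrom := by
        rw [h1]; simp [hne.symm]
      simp [h1, hb]
    · by_cases h2 : pyAListGet? x "key" = some hdxCameFrom
      · simp [h2, hb']
      · have e1 : (pyAListGet? x "key" == some hdxCameFromState) = false := by simp [h1]
        have e2 : (pyAListGet? x "key" == some hdxCameFrom) = false := by simp [h2]
        simp [e1, e2]

-- ===== VERDICT (by name: the statement is the Claim_ definition above) =====
theorem get_user_extra_py_spec : Claim_equal_get_user_extra_py := by
  intro ue _ _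
  unfold Spec_get_user_extra_py get_user_extra_py get_user_extra_py_alt
  rw [pv_inv]
  cases h1 : ue.reverse.find? (fun it => pyAListGet? it "key" == some hdxCameFrom) <;>
    cases h2 : ue.reverse.find? (fun it => pyAListGet? it "key" == some hdxCameFromState) <;>
    simp [h1, h2, Option.bind]
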